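-- pv_equiv track=rewrite | github.com/felipeganho/signals-and-systems | Lab003/ex02c - Felipe Silva Ganho.py | sinal_fase
-- ===== SOURCE A (Python) =====
-- def sinal_fase(n):
--   fase = []
--
--   for i in range(len(n)):
--     if i == 3:
--       fase.append(-1)
--     elif i == 4:
--       fase.append(1)
--     else:
--       fase.append(0)
--
--   return fase
-- ===== SOURCE B (Python) =====
-- def sinal_fase(n):
--   # Fixed template of the only non-trivial prefix, padded with zeros and
--   # truncated to the input length: no per-element branching at all.
--   template = [0, 0, 0, -1, 1]
--   k = len(n)
--   return (template + [0] * (k - 5))[:k]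
-- ===== Notes on version B (the rewrite author's own statement) =====
-- stated objective: simpler
-- what changed: Replaces the per-index branching append loop with a fixed 5-element template [0,0,0,-1,1] padded with zeros to the input length and sliced to exactly len(n) elements.
import Mathlib
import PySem

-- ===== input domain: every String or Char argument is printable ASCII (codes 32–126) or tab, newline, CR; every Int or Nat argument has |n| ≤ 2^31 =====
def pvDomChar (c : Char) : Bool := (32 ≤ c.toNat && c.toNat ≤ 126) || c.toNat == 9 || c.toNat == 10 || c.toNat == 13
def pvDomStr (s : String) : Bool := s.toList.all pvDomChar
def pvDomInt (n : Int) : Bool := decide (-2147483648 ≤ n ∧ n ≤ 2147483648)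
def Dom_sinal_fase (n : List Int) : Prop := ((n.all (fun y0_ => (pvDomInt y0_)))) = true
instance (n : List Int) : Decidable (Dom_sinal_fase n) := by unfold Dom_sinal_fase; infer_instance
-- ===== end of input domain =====

-- B replaces A's per-index branching loop with a fixed template [0,0,0,-1,1] padded with zeros and truncated to len(n) (simpler decomposition).

-- ===== PORT A =====
-- for i in range(len(n)): append -1 / 1 / 0 depending on i
def sinal_fase (n : List Int) : List Int :=
  (List.range n.length).foldl
    (fun fase i =>
      if i = 3 then fase ++ [(-1 : Int)]
      else if i = 4 then fase ++ [(1 : Int)]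
      else fase ++ [(0 : Int)])
    []

-- ===== PORT B =====
-- (template + [0] * (k - 5))[:k] ; Python [0]*(k-5) is [] for k<5, matching Nat subtraction,
-- and the slice [:k] with k = len ≥ 0 is exactly List.take k
def sinal_fase_alt (n : List Int) : List Int :=
  let template : List Int := [0, 0, 0, -1, 1]
  let k := n.length
  (template ++ List.replicate (k - 5) (0 : Int)).take k

-- ===== PRECONDITION & SPEC =====
def Spec_sinal_fase (n : List Int) (out : List Int) : Prop := out = sinal_fase_alt n
instance (n : List Int) (out : List Int) : Decidable (Spec_sinal_fase n out) := by unfold Spec_sinal_fase; infer_instance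

-- ===== CLAIM (what is proved, stated in full; the proofs are below) =====
def Claim_equal_sinal_fase : Prop := ∀ (n : List Int), Dom_sinal_fase n → Spec_sinal_fase n (sinal_fase n)

-- ===== LEMMAS AND PROOFS =====
theorem sinal_fase_eq_map (n : List Int) :
    sinal_fase n = (List.range n.length).map
      (fun i => if i = 3 then (-1 : Int) else if i = 4 then 1 else 0) := by
  unfold sinal_fase
  have hb : (fun (fase : List Int) (i : Nat) =>
      if i = 3 then fase ++ [(-1 : Int)]
      else if i = 4 then fase ++ [(1 : Int)]
      else fase ++ [(0 : Int)])
    = (fun fase i => fase ++ [if i = 3 then (-1 : Int) else if i = 4 then 1 else 0]) := by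
    funext fase i; split_ifs <;> rfl
  rw [hb, PySem.List.foldl_append_singleton_eq_map]; rfl

-- ===== VERDICT (by name: the statement is the Claim_ definition above) =====
theorem sinal_fase_spec : Claim_equal_sinal_fase := by
  intro n _
  unfold Spec_sinal_fase sinal_fase_alt
  rw [sinal_fase_eq_map]
  apply List.ext_getElem
  · simp [List.length_take]; omega
  · intro i h1 h2
    simp only [List.getElem_map, List.getElem_range, List.getElem_take]
    rcases Nat.lt_or_ge i 5 with h5 | h5
    · interval_cases i <;> simp_all
    · have : i - 5 < (n.length - 5) := by simp at h1; omega
      rw [List.getElem_append_right (by simp; omega)]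
      simp [List.getElem_replicate]
      omega
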